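/- GENERATED by farm/mkstatement.py from design/units.tsv (unit `clamp_length`) and the Specs of Toyh/Spec/*.lean — do not edit.
   THE STATEMENT of the proof unit `clamp_length`: the function `clamp_length` (10 instructions) satisfies its contract,
   given the contracts of its callees. What the names mean: ProgX/Base/Spec/Basic.lean. The theorem to prove:
   `theorem clamp_length_ok : Toyh.Spec.clamp_length.Statement`. -/
import Toyh.Code
import Toyh.Dec.All
import Toyh.Labels
import Toyh.Spec.Toyh
namespace Toyh.Spec.clamp_length
open X86 X86.User Asan

/-- The statement of unit `clamp_length`. -/
def Statement : Prop :=
  ∀ (Lay : Layout) (_hLay : Lay.hi = 0x1000000) (μ : Microarch) (_hμ : UserX.MicroOK μ) (u₀ : State)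
    (_hcode : HasCodeNat Lay u₀ Toyh.L.clamp_length.entry Toyh.Code.code_clamp_length.nat Toyh.L.clamp_length.size),
    ∀ (others : List Obj) (frames : List (Nat × FrameLayout)), Calls Lay μ ProgX.Base.WayInv (ProgX.Base.conv u₀) Toyh.L.clamp_length.entry (Toyh.Spec.clamp_length.spec others frames)

end Toyh.Spec.clamp_length
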